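-- pv_equiv track=rewrite | github.com/udhayprakash/Python_for_interview_preparation | word_combinaion.py | word_combinations
-- ===== SOURCE A (Python) =====
-- from collections import defaultdict
--
-- def word_combinations(A, N):
--     """ Method 2 -O(nm)"""
--     processed = defaultdict(list)
--     for word in A:
--         processed[len(word)].append(word)
--
--     combinations = set()
--     for p_wordlen, p_words in processed.items():
--         if p_wordlen == N:
--             combinations.update(p_words)
--         else:
--             remlen = N - p_wordlen
--             if not remlen in processed:
--                 continue
--             for wd1 in p_words:
--                 for wd2 in processed[remlen]:
--                     if wd1 + wd2 in A:
--                         combinations.add(wd1 + wd2)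
--     return sorted(combinations)
-- ===== SOURCE B (Python) =====
-- def word_combinations(A, N):
--     """Brute force over all pairs, no length-grouping index."""
--     result = set()
--     for w1 in A:
--         if len(w1) == N:
--             result.add(w1)
--         for w2 in A:
--             w = w1 + w2
--             if len(w1) + len(w2) == N and w in A:
--                 result.add(w)
--     return sorted(result)
-- ===== Notes on version B (the rewrite author's own statement) =====
-- stated objective: simpler
-- what changed: Removed the defaultdict length-grouping index and the items() iteration: B keeps one result set and scans all ordered pairs directly, adding w1+w2 when the lengths sum to N and w1+w2 is in A, plus w1 itself when len(w1)==N.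
import Mathlib
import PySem

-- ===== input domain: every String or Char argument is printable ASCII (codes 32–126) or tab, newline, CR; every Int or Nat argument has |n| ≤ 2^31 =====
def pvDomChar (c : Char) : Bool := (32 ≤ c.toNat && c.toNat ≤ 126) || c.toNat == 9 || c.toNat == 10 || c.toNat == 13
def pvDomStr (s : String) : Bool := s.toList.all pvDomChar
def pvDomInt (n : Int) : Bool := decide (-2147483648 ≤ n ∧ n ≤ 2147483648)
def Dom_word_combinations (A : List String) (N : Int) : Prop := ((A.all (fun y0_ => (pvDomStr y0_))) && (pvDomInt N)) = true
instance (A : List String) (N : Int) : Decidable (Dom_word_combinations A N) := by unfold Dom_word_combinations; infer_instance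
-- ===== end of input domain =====

-- B removes A's defaultdict length-grouping index and scans all ordered pairs directly (simpler decomposition, same results).


-- ===== PORT A =====
def word_combinations (A : List String) (N : Int) : List String :=
  let processed : PySem.Dict Int (List String) :=
    A.foldl (fun d word => d.modify (PySem.Str.len word) [] (fun l => l ++ [word])) PySem.Dict.empty
  let combinations : PySem.Set String :=
    processed.items.foldl (fun comb p =>
      if p.1 == N then PySem.Set.update comb p.2
      else
        if !(processed.contains (N - p.1)) then comb
        else p.2.foldl (fun comb wd1 =>
          (processed.getD (N - p.1) []).foldl (fun comb wd2 =>
            if (wd1 ++ wd2) ∈ A then PySem.Set.add comb (wd1 ++ wd2) else comb) comb) comb)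
      PySem.Set.empty
  PySem.List.sorted combinations (fun x => x)

-- ===== PORT B =====
def word_combinations_alt (A : List String) (N : Int) : List String :=
  let result : PySem.Set String :=
    A.foldl (fun res w1 =>
      A.foldl (fun res w2 =>
        if PySem.Str.len w1 + PySem.Str.len w2 = N ∧ (w1 ++ w2) ∈ A
        then PySem.Set.add res (w1 ++ w2) else res)
        (if PySem.Str.len w1 == N then PySem.Set.add res w1 else res))
      PySem.Set.empty
  PySem.List.sorted result (fun x => x)

-- ===== PRECONDITION & SPEC =====
def Spec_word_combinations (A : List String) (N : Int) (out : List String) : Prop := out = word_combinations_alt A N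
instance (A : List String) (N : Int) (out : List String) : Decidable (Spec_word_combinations A N out) := by unfold Spec_word_combinations; infer_instance

-- ===== CLAIM (what is proved, stated in full; the proofs are below) =====
def Claim_equal_word_combinations : Prop := ∀ (A : List String) (N : Int), Dom_word_combinations A N → Spec_word_combinations A N (word_combinations A N)

-- ===== LEMMAS AND PROOFS =====

-- membership in a fold whose step adds exactly the elements described by R
lemma mem_addfold {α : Type} (R : α → String → Prop) (g : PySem.Set String → α → PySem.Set String)
    (H : ∀ s a x, x ∈ g s a ↔ x ∈ s ∨ R a x) :
    ∀ (l : List α) (s : PySem.Set String) (x : String),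
      x ∈ l.foldl g s ↔ x ∈ s ∨ ∃ a ∈ l, R a x := by
  intro l
  induction l with
  | nil => simp
  | cons a l ih =>
    intro s x
    rw [List.foldl_cons, ih, H]
    simp only [List.mem_cons]
    constructor
    · rintro ((h | h) | ⟨a', ha', hR⟩)
      · exact Or.inl h
      · exact Or.inr ⟨a, Or.inl rfl, h⟩
      · exact Or.inr ⟨a', Or.inr ha', hR⟩
    · rintro (h | ⟨a', (rfl | ha'), hR⟩)
      · exact Or.inl (Or.inl h)
      · exact Or.inl (Or.inr hR)
      · exact Or.inr ⟨a', ha', hR⟩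

-- nodup is preserved through a fold whose step preserves nodup
lemma nodup_addfold {α : Type} (g : PySem.Set String → α → PySem.Set String)
    (H : ∀ s a, s.Nodup → (g s a).Nodup) :
    ∀ (l : List α) (s : PySem.Set String), s.Nodup → (l.foldl g s).Nodup := by
  intro l
  induction l with
  | nil => intro s hs; simpa using hs
  | cons a l ih => intro s hs; exact ih _ (H s a hs)

-- the length buckets of A's 'processed' dict
lemma processed_getD (A : List String) (L : Int) (w : String) :
    w ∈ (A.foldl (fun d word => d.modify (PySem.Str.len word) [] (fun l => l ++ [word]))
          PySem.Dict.empty).getD L [] ↔ w ∈ A ∧ PySem.Str.len w = L := by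
  rw [show (A.foldl (fun d word => d.modify (PySem.Str.len word) [] (fun l => l ++ [word]))
        PySem.Dict.empty)
      = ((A.map (fun w => (PySem.Str.len w, w))).foldl
          (fun d p => d.modify p.1 [] (fun l => l ++ [p.2])) PySem.Dict.empty) from
      by rw [List.foldl_map]]
  rw [PySem.Dict.getD_foldl_modify_append]
  simp only [PySem.Dict.getD_empty, List.nil_append, List.filter_map, List.map_map,
    Function.comp_def, List.mem_map, List.mem_filter, beq_iff_eq]
  constructor
  · rintro ⟨a, ⟨ha, hL⟩, rfl⟩
    exact ⟨ha, hL⟩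
  · rintro ⟨hw, hL⟩
    exact ⟨w, ⟨hw, hL⟩, rfl⟩

-- the keys of A's 'processed' dict
lemma processed_keys (A : List String) :
    (A.foldl (fun d word => d.modify (PySem.Str.len word) [] (fun l => l ++ [word]))
        PySem.Dict.empty).keys
      = PySem.Set.ofList (A.map PySem.Str.len) := by
  rw [PySem.Dict.keys_foldl_modify_key A PySem.Str.len [] (fun d w l => l ++ [w])]
  exact PySem.Set.update_empty _

lemma processed_keys_nodup (A : List String) :
    (A.foldl (fun d word => d.modify (PySem.Str.len word) [] (fun l => l ++ [word]))
        PySem.Dict.empty).keys.Nodup :=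
  PySem.Dict.nodup_keys_foldl_modify_key A PySem.Str.len [] (fun d w l => l ++ [w])
    PySem.Dict.empty (by simp)

-- the common membership characterisation both result sets satisfy
def wcP (A : List String) (N : Int) (x : String) : Prop :=
  (x ∈ A ∧ PySem.Str.len x = N) ∨
    ∃ w1 ∈ A, ∃ w2 ∈ A, PySem.Str.len w1 + PySem.Str.len w2 = N ∧ (w1 ++ w2) ∈ A ∧ x = w1 ++ w2

-- membership in A's combinations set, for any dict behaving like the length index
lemma mem_set_A (A : List String) (N : Int) (d : PySem.Dict Int (List String))
    (hnd : d.keys.Nodup)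
    (hkeys : d.keys = PySem.Set.ofList (A.map PySem.Str.len))
    (hget : ∀ L w, w ∈ d.getD L [] ↔ w ∈ A ∧ PySem.Str.len w = L) (x : String) :
    (x ∈ d.items.foldl
        (fun comb p =>
          if p.1 == N then PySem.Set.update comb p.2
          else
            if !(d.contains (N - p.1)) then comb
            else p.2.foldl (fun comb wd1 =>
              (d.getD (N - p.1) []).foldl (fun comb wd2 =>
                if (wd1 ++ wd2) ∈ A then PySem.Set.add comb (wd1 ++ wd2) else comb) comb) comb)
        PySem.Set.empty) ↔ wcP A N x := by
  rw [mem_addfold (fun p x =>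
        (p.1 = N ∧ x ∈ p.2) ∨
          (p.1 ≠ N ∧ d.contains (N - p.1) = true ∧
            ∃ w1 ∈ p.2, ∃ w2 ∈ d.getD (N - p.1) [], (w1 ++ w2) ∈ A ∧ x = w1 ++ w2))]
  · -- translate ∃ p ∈ items, … into wcP
    rw [PySem.Dict.items_eq_map_keys d hnd []]
    simp only [List.mem_map]
    constructor
    · rintro (h | ⟨p, ⟨L, hLk, rfl⟩, hp⟩)
      · exact absurd h (by simp [PySem.Set.empty])
      rcases hp with ⟨hLN, hx⟩ | ⟨hLN, hcont, w1, hw1, w2, hw2, hin, rfl⟩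
      · left
        rcases (hget L x).mp hx with ⟨hxA, hlen⟩
        exact ⟨hxA, by rw [hlen]; exact hLN⟩
      · right
        rcases (hget L w1).mp hw1 with ⟨hw1A, hlen1⟩
        rcases (hget (N - L) w2).mp hw2 with ⟨hw2A, hlen2⟩
        exact ⟨w1, hw1A, w2, hw2A, by omega, hin, rfl⟩
    · rintro (⟨hxA, hlen⟩ | ⟨w1, hw1A, w2, hw2A, hsum, hin, rfl⟩)
      · refine Or.inr ⟨(N, d.getD N []), ⟨N, ?_, rfl⟩, Or.inl ⟨rfl, (hget N x).mpr ⟨hxA, hlen⟩⟩⟩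
        rw [hkeys]
        exact (PySem.Set.mem_ofList _ _).mpr (List.mem_map.mpr ⟨x, hxA, hlen⟩)
      · by_cases hLN : PySem.Str.len w1 = N
        · -- len w2 = 0 here, so w1 ++ w2 is itself a word of A of length N
          refine Or.inr ⟨(N, d.getD N []), ⟨N, ?_, rfl⟩, Or.inl ⟨rfl, (hget N _).mpr ⟨hin, ?_⟩⟩⟩
          · rw [hkeys]
            exact (PySem.Set.mem_ofList _ _).mpr (List.mem_map.mpr ⟨w1, hw1A, hLN⟩)
          · rw [PySem.Str.len_append]; omega
        · refine Or.inr ⟨(PySem.Str.len w1, d.getD (PySem.Str.len w1) []), ⟨PySem.Str.len w1, ?_, rfl⟩,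
            Or.inr ⟨hLN, ?_, w1, (hget _ w1).mpr ⟨hw1A, rfl⟩,
              w2, (hget _ w2).mpr ⟨hw2A, by omega⟩, hin, rfl⟩⟩
          · rw [hkeys]
            exact (PySem.Set.mem_ofList _ _).mpr (List.mem_map.mpr ⟨w1, hw1A, rfl⟩)
          · rw [PySem.Dict.contains_iff_mem_keys, hkeys]
            exact (PySem.Set.mem_ofList _ _).mpr (List.mem_map.mpr ⟨w2, hw2A, by omega⟩)
  · -- the step hypothesis of mem_addfold
    intro s p x
    by_cases hLN : p.1 = N
    · simp only [hLN, beq_self_eq_true, if_true, PySem.Set.mem_update]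
      tauto
    · simp only [beq_iff_eq, hLN, if_false]
      by_cases hc : d.contains (N - p.1) = true
      · rw [hc]
        simp only [Bool.not_true, Bool.false_eq_true, if_false]
        rw [mem_addfold (fun wd1 x =>
              ∃ w2 ∈ d.getD (N - p.1) [], (wd1 ++ w2) ∈ A ∧ x = wd1 ++ w2)
            (H := ?_)]
        · tauto
        · intro s' wd1 y
          rw [mem_addfold (fun wd2 y => (wd1 ++ wd2) ∈ A ∧ y = wd1 ++ wd2) (H := ?_)]
          · intro s'' wd2 z
            split_ifs with h
            · rw [PySem.Set.mem_add]
              tauto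
            · tauto
      · rw [Bool.not_eq_true] at hc
        rw [hc]
        simp only [Bool.not_false, if_true]
        constructor
        · exact Or.inl
        · rintro (h | ⟨hpn, _⟩ | ⟨_, hcc, _⟩)
          · exact h
          · exact hpn.elim
          · exact absurd hcc (by simp)

lemma mem_set_B (A : List String) (N : Int) (x : String) :
    (x ∈ A.foldl (fun res w1 =>
        A.foldl (fun res w2 =>
          if PySem.Str.len w1 + PySem.Str.len w2 = N ∧ (w1 ++ w2) ∈ A
          then PySem.Set.add res (w1 ++ w2) else res)
          (if PySem.Str.len w1 == N then PySem.Set.add res w1 else res))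
        PySem.Set.empty) ↔ wcP A N x := by
  rw [mem_addfold (fun w1 x =>
        (PySem.Str.len w1 = N ∧ x = w1) ∨
          ∃ w2 ∈ A, PySem.Str.len w1 + PySem.Str.len w2 = N ∧ (w1 ++ w2) ∈ A ∧ x = w1 ++ w2)]
  · constructor
    · rintro (h | ⟨w1, hw1A, ⟨hLN, rfl⟩ | ⟨w2, hw2A, hsum, hin, rfl⟩⟩)
      · exact absurd h (by simp [PySem.Set.empty])
      · exact Or.inl ⟨hw1A, hLN⟩
      · exact Or.inr ⟨w1, hw1A, w2, hw2A, hsum, hin, rfl⟩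
    · rintro (⟨hxA, hlen⟩ | ⟨w1, hw1A, w2, hw2A, hsum, hin, rfl⟩)
      · exact Or.inr ⟨x, hxA, Or.inl ⟨hlen, rfl⟩⟩
      · exact Or.inr ⟨w1, hw1A, Or.inr ⟨w2, hw2A, hsum, hin, rfl⟩⟩
  · intro s w1 y
    rw [mem_addfold (fun w2 y =>
          PySem.Str.len w1 + PySem.Str.len w2 = N ∧ (w1 ++ w2) ∈ A ∧ y = w1 ++ w2) (H := ?_)]
    · split_ifs with h
      · rw [PySem.Set.mem_add]
        simp only [beq_iff_eq] at h
        tauto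
      · simp only [beq_iff_eq] at h
        tauto
    · intro s' w2 z
      split_ifs with h
      · rw [PySem.Set.mem_add]
        tauto
      · tauto

lemma nodup_set_A (A : List String) (N : Int) (d : PySem.Dict Int (List String)) :
    (d.items.foldl (fun comb p =>
        if p.1 == N then PySem.Set.update comb p.2
        else
          if !(d.contains (N - p.1)) then comb
          else p.2.foldl (fun comb wd1 =>
            (d.getD (N - p.1) []).foldl (fun comb wd2 =>
              if (wd1 ++ wd2) ∈ A then PySem.Set.add comb (wd1 ++ wd2) else comb) comb) comb)
      PySem.Set.empty).Nodup := by
  apply nodup_addfold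
  · intro s p hs
    split_ifs with h1 h2
    · exact PySem.Set.nodup_update _ _ hs
    · exact hs
    · refine nodup_addfold _ ?_ _ _ hs
      intro s' wd1 hs'
      refine nodup_addfold _ ?_ _ _ hs'
      intro s'' wd2 hs''
      split_ifs
      · exact PySem.Set.nodup_add _ _ hs''
      · exact hs''
  · simp [PySem.Set.empty]

lemma nodup_set_B (A : List String) (N : Int) :
    (A.foldl (fun res w1 =>
        A.foldl (fun res w2 =>
          if PySem.Str.len w1 + PySem.Str.len w2 = N ∧ (w1 ++ w2) ∈ A
          then PySem.Set.add res (w1 ++ w2) else res)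
          (if PySem.Str.len w1 == N then PySem.Set.add res w1 else res))
      PySem.Set.empty).Nodup := by
  apply nodup_addfold
  · intro s w1 hs
    refine nodup_addfold _ ?_ _ _ ?_
    · intro s' w2 hs'
      split_ifs
      · exact PySem.Set.nodup_add _ _ hs'
      · exact hs'
    · split_ifs
      · exact PySem.Set.nodup_add _ _ hs
      · exact hs
  · simp [PySem.Set.empty]

-- ===== VERDICT (by name: the statement is the Claim_ definition above) =====
theorem word_combinations_spec : Claim_equal_word_combinations := by
  intro A N _
  unfold Spec_word_combinations word_combinations word_combinations_alt
  apply PySem.List.sorted_eq_sorted_of_perm _ _ _ (fun a b h => h)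
  rw [List.perm_ext_iff_of_nodup (nodup_set_A A N _) (nodup_set_B A N)]
  intro x
  rw [mem_set_A A N _ (processed_keys_nodup A) (processed_keys A) (processed_getD A), mem_set_B]
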